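-- pv_equiv track=rewrite | github.com/GidonPeeper/LEACE | Syntactic_distances/pyfiles/Probing/linear_probe_deplabs.py | align_labels_to_embeddings
-- ===== SOURCE A (Python) =====
-- def align_labels_to_embeddings(label_sentences, emb_lengths):
--     aligned_labels = []
--     label_idx = 0
--     for emb_len in emb_lengths:
--         # Skip label sentences until we find one with the right length
--         while label_idx < len(label_sentences) and len(label_sentences[label_idx]) != emb_len:
--             label_idx += 1
--         if label_idx == len(label_sentences):
--             break
--         aligned_labels.append(label_sentences[label_idx])
--         label_idx += 1
--     return aligned_labels
-- ===== SOURCE B (Python) =====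
-- def align_labels_to_embeddings(label_sentences, emb_lengths):
--     # Index labels by length once; then answer each emb_len by consuming the
--     # first still-unused bucket entry at/after the global position p.
--     buckets = {}
--     for i, sent in enumerate(label_sentences):
--         buckets.setdefault(len(sent), []).append(i)
--     cursors = {}
--     aligned = []
--     p = 0
--     for e in emb_lengths:
--         bucket = buckets.get(e, [])
--         k = cursors.get(e, 0)
--         while k < len(bucket) and bucket[k] < p:
--             k += 1
--         if k >= len(bucket):
--             break
--         aligned.append(label_sentences[bucket[k]])
--         p = bucket[k] + 1
--         cursors[e] = k + 1
--     return aligned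
-- ===== Notes on version B (the rewrite author's own statement) =====
-- stated objective: alternative
-- what changed: B builds a hash index from sentence length to the list of label positions in one pass, then serves each emb_len from that bucket (with a per-length cursor and a global position bound), so matching is a bucket lookup instead of A's inner while-scan over the label list.
import Mathlib
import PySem

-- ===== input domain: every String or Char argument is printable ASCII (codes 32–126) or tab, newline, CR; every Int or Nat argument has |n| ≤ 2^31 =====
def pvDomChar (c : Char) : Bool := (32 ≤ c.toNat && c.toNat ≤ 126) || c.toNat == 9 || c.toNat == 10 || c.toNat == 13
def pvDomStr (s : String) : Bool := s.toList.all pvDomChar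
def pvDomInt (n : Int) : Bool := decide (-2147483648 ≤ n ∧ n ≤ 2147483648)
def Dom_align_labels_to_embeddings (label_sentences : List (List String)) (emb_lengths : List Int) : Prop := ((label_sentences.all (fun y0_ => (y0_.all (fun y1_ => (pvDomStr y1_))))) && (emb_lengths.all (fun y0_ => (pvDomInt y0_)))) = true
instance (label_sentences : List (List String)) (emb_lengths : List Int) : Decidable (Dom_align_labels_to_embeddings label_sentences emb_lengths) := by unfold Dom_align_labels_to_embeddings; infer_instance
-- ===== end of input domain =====

-- B replaces A's inner while-scan over the label list by a hash index from sentence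
-- length to label positions, served per emb_len with a cursor and a position bound
-- (alternative data structure, same cost).

-- ===== PORT A =====
-- inner 'while label_idx < len(label_sentences) and len(label_sentences[label_idx]) != emb_len'
def pvFindIdxA (ls : List (List String)) (i : Nat) (e : Int) : Nat :=
  if h : i < ls.length then
    if (ls[i].length : Int) ≠ e then pvFindIdxA ls (i + 1) e else i
  else i
termination_by ls.length - i

-- the 'for emb_len in emb_lengths' loop with state (label_idx, aligned_labels)
def pvGoA (ls : List (List String)) (embs : List Int) (idx : Nat)
    (acc : List (List String)) : List (List String) :=
  match embs with
  | [] => acc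
  | e :: rest =>
    let i := pvFindIdxA ls idx e
    if i = ls.length then acc
    else pvGoA ls rest (i + 1) (acc ++ [ls.getD i []])

def align_labels_to_embeddings (label_sentences : List (List String)) (emb_lengths : List Int) : List (List String) :=
  pvGoA label_sentences emb_lengths 0 []

-- ===== PORT B =====
-- 'buckets.setdefault(len(sent), []).append(i)' over enumerate(label_sentences):
-- setdefault-then-append is exactly d.modify key [] (· ++ [i]) (d[key] = d.get(key, []) + [i])
def pvBuckets (ls : List (List String)) : PySem.Dict Int (List Int) :=
  (PySem.List.enumerate ls).foldl
    (fun d p => d.modify ((p.2.length : Int)) [] (· ++ [p.1])) PySem.Dict.empty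

-- 'while k < len(bucket) and bucket[k] < p'
def pvSkipB (bucket : List Int) (k : Nat) (p : Int) : Nat :=
  if h : k < bucket.length then
    if bucket[k] < p then pvSkipB bucket (k + 1) p else k
  else k
termination_by bucket.length - k

-- 'for e in emb_lengths' with state (cursors, p, aligned); cursor values are the
-- nonnegative ints k, kept as Nat
def pvGoB (ls : List (List String)) (buckets : PySem.Dict Int (List Int))
    (embs : List Int) (cursors : PySem.Dict Int Nat) (p : Int)
    (acc : List (List String)) : List (List String) :=
  match embs with
  | [] => acc
  | e :: rest =>
    let bucket := buckets.getD e []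
    let k := pvSkipB bucket (cursors.getD e 0) p
    if h : k < bucket.length then
      pvGoB ls buckets rest (cursors.insert e (k + 1)) (bucket[k] + 1)
        (acc ++ [PySem.List.pyGetD ls bucket[k] []])
    else acc

def align_labels_to_embeddings_alt (label_sentences : List (List String)) (emb_lengths : List Int) : List (List String) :=
  pvGoB label_sentences (pvBuckets label_sentences) emb_lengths PySem.Dict.empty 0 []

-- ===== PRECONDITION & SPEC =====
def Spec_align_labels_to_embeddings (label_sentences : List (List String)) (emb_lengths : List Int) (out : List (List String)) : Prop := out = align_labels_to_embeddings_alt label_sentences emb_lengths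
instance (label_sentences : List (List String)) (emb_lengths : List Int) (out : List (List String)) : Decidable (Spec_align_labels_to_embeddings label_sentences emb_lengths out) := by unfold Spec_align_labels_to_embeddings; infer_instance

-- ===== CLAIM (what is proved, stated in full; the proofs are below) =====
def Claim_equal_align_labels_to_embeddings : Prop := ∀ (label_sentences : List (List String)) (emb_lengths : List Int), Dom_align_labels_to_embeddings label_sentences emb_lengths → Spec_align_labels_to_embeddings label_sentences emb_lengths (align_labels_to_embeddings label_sentences emb_lengths)

-- ===== LEMMAS AND PROOFS =====

-- characterisation of A's inner scan: least i ≥ start with the right length, else len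
lemma pvFindIdxA_char (ls : List (List String)) (e : Int) :
    ∀ i, i ≤ ls.length →
      i ≤ pvFindIdxA ls i e ∧ pvFindIdxA ls i e ≤ ls.length ∧
      (∀ j (hj : j < ls.length), i ≤ j → j < pvFindIdxA ls i e → (ls[j].length : Int) ≠ e) ∧
      (∀ h : pvFindIdxA ls i e < ls.length, (ls[pvFindIdxA ls i e].length : Int) = e) := by
  intro i
  induction' hn : ls.length - i using Nat.strong_induction_on with n ih generalizing i
  intro hi
  by_cases h : i < ls.length
  · by_cases hm : (ls[i].length : Int) ≠ e
    · have hEq : pvFindIdxA ls i e = pvFindIdxA ls (i + 1) e := by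
        rw [pvFindIdxA]; simp [h, hm]
      obtain ⟨h1, h2, h3, h4⟩ := ih (ls.length - (i + 1)) (by omega) (i + 1) rfl (by omega)
      rw [hEq]
      refine ⟨by omega, h2, ?_, h4⟩
      intro j hj hij hjf
      by_cases hji : j = i
      · subst hji; exact hm
      · exact h3 j hj (by omega) hjf
    · have hEq : pvFindIdxA ls i e = i := by
        rw [pvFindIdxA]; simp [h, hm]
      push Not at hm
      rw [hEq]
      exact ⟨le_refl _, le_of_lt h, fun j hj hij hjf => absurd hjf (by omega),
        fun _ => hm⟩
  · have hEq : pvFindIdxA ls i e = i := by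
      rw [pvFindIdxA]; simp [h]
    rw [hEq]
    exact ⟨le_refl _, hi, fun j hj hij hjf => absurd hjf (by omega),
      fun hlt => absurd hlt (by omega)⟩

-- characterisation of B's cursor advance
lemma pvSkipB_char (b : List Int) (p : Int) :
    ∀ k, k ≤ b.length →
      k ≤ pvSkipB b k p ∧ pvSkipB b k p ≤ b.length ∧
      (∀ j (hj : j < b.length), k ≤ j → j < pvSkipB b k p → b[j] < p) ∧
      (∀ h : pvSkipB b k p < b.length, p ≤ b[pvSkipB b k p]) := by
  intro k
  induction' hn : b.length - k using Nat.strong_induction_on with n ih generalizing k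
  intro hk
  by_cases h : k < b.length
  · by_cases hm : b[k] < p
    · have hEq : pvSkipB b k p = pvSkipB b (k + 1) p := by
        rw [pvSkipB]; simp [h, hm]
      obtain ⟨h1, h2, h3, h4⟩ := ih (b.length - (k + 1)) (by omega) (k + 1) rfl (by omega)
      rw [hEq]
      refine ⟨by omega, h2, ?_, h4⟩
      intro j hj hkj hjs
      by_cases hjk : j = k
      · subst hjk; exact hm
      · exact h3 j hj (by omega) hjs
    · have hEq : pvSkipB b k p = k := by
        rw [pvSkipB]; simp [h, hm]
      rw [hEq]
      exact ⟨le_refl _, le_of_lt h, fun j hj hkj hjs => absurd hjs (by omega),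
        fun _ => by omega⟩
  · have hEq : pvSkipB b k p = k := by
      rw [pvSkipB]; simp [h]
    rw [hEq]
    exact ⟨le_refl _, hk, fun j hj hkj hjs => absurd hjs (by omega),
      fun hlt => absurd hlt (by omega)⟩

-- the bucket for e holds exactly the indices (as Ints) of label sentences of length e,
-- in increasing order
lemma pvBuckets_eq (ls : List (List String)) (e : Int) :
    (pvBuckets ls).getD e [] =
      ((PySem.List.enumerate ls).filter (fun p => (p.2.length : Int) == e)).map (·.1) := by
  have h : pvBuckets ls
      = ((PySem.List.enumerate ls).map (fun p => ((p.2.length : Int), p.1))).foldl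
          (fun d q => d.modify q.1 [] (· ++ [q.2])) PySem.Dict.empty := by
    unfold pvBuckets
    rw [List.foldl_map]
  rw [h, PySem.Dict.getD_foldl_modify_append, PySem.Dict.getD_empty,
    List.filter_map, List.map_map]
  rfl

lemma pvBucket_mem (ls : List (List String)) (e : Int) (x : Int) :
    x ∈ (pvBuckets ls).getD e [] ↔
      ∃ (j : Nat) (hj : j < ls.length), x = (j : Int) ∧ (ls[j].length : Int) = e := by
  rw [pvBuckets_eq]
  simp only [List.mem_map, List.mem_filter, PySem.List.mem_enumerate_iff]
  constructor
  · rintro ⟨p, ⟨⟨k, hk, hp⟩, hc⟩, hx⟩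
    subst hp
    simp at hc hx
    exact ⟨k, hk, by omega, hc⟩
  · rintro ⟨j, hj, hx, hc⟩
    exact ⟨((j : Int), ls[j]), ⟨⟨j, hj, by simp⟩, by simp [hc]⟩, by simp [hx]⟩

lemma pvBucket_sorted (ls : List (List String)) (e : Int) :
    ((pvBuckets ls).getD e []).Pairwise (· < ·) := by
  rw [pvBuckets_eq, List.pairwise_map]
  exact (PySem.List.pairwise_lt_enumerate ls 0).sublist List.filter_sublist

-- invariant on the cursors dict: every consumed bucket entry lies below q
def pvInv (ls : List (List String)) (cursors : PySem.Dict Int Nat) (q : Nat) : Prop :=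
  ∀ e : Int, cursors.getD e 0 ≤ ((pvBuckets ls).getD e []).length ∧
    ∀ j (hj : j < ((pvBuckets ls).getD e []).length),
      j < cursors.getD e 0 → ((pvBuckets ls).getD e [])[j] < (q : Int)

-- bridge: with the invariant, B's bucket step finds exactly A's scan result
lemma pvBridge (ls : List (List String)) (cursors : PySem.Dict Int Nat) (q : Nat) (e : Int)
    (hq : q ≤ ls.length) (hinv : pvInv ls cursors q) :
    (pvSkipB ((pvBuckets ls).getD e []) (cursors.getD e 0) (q : Int) <
        ((pvBuckets ls).getD e []).length ↔ pvFindIdxA ls q e < ls.length) ∧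
    (∀ h : pvSkipB ((pvBuckets ls).getD e []) (cursors.getD e 0) (q : Int) <
        ((pvBuckets ls).getD e []).length,
      ((pvBuckets ls).getD e [])[pvSkipB ((pvBuckets ls).getD e []) (cursors.getD e 0) (q : Int)]
        = (pvFindIdxA ls q e : Int)) := by
  obtain ⟨hc1, hc2⟩ := hinv e
  obtain ⟨hk1, hk2, hk3, hk4⟩ := pvSkipB_char ((pvBuckets ls).getD e []) (q : Int) (cursors.getD e 0) hc1
  obtain ⟨hf1, hf2, hf3, hf4⟩ := pvFindIdxA_char ls e q hq
  set b := (pvBuckets ls).getD e [] with hb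
  set k := pvSkipB b (cursors.getD e 0) (q : Int) with hkdef
  set f := pvFindIdxA ls q e with hfdef
  have hlow : ∀ j (hj : j < b.length), j < k → b[j] < (q : Int) := by
    intro j hj hjk
    by_cases hjc : j < cursors.getD e 0
    · exact hc2 j hj hjc
    · exact hk3 j hj (by omega) hjk
  have hmemiff : ∀ x : Int, x ∈ b ↔
      ∃ (j : Nat) (hj : j < ls.length), x = (j : Int) ∧ (ls[j].length : Int) = e :=
    fun x => pvBucket_mem ls e x
  have hsorted := pvBucket_sorted ls e
  rw [List.pairwise_iff_getElem] at hsorted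
  have hrev : f < ls.length → k < b.length := by
    intro hfn
    by_contra hkb
    have hmem : (f : Int) ∈ b := (hmemiff _).mpr ⟨f, hfn, rfl, hf4 hfn⟩
    obtain ⟨j, hj, hje⟩ := List.getElem_of_mem hmem
    have := hlow j hj (by omega)
    omega
  have hfwd : ∀ h : k < b.length, f < ls.length ∧ b[k] = (f : Int) := by
    intro h
    obtain ⟨i, hi, hie, hic⟩ := (hmemiff _).mp (List.getElem_mem h)
    have hqi : (q : Int) ≤ b[k] := hk4 h
    have hfi : f ≤ i := by
      by_contra hif
      exact hf3 i hi (by omega) (by omega) hic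
    have hfn : f < ls.length := by omega
    have hmemf : (f : Int) ∈ b := (hmemiff _).mpr ⟨f, hfn, rfl, hf4 hfn⟩
    obtain ⟨j, hj, hje⟩ := List.getElem_of_mem hmemf
    have hkj : k ≤ j := by
      by_contra hjk
      have := hlow j hj (by omega)
      omega
    have hble : b[k] ≤ (f : Int) := by
      rcases Nat.lt_or_ge k j with hlt | hge
      · have h1 := hsorted k j h hj hlt
        rw [hje] at h1
        exact le_of_lt h1
      · have : k = j := by omega
        subst this
        omega
    refine ⟨hfn, ?_⟩
    omega
  constructor
  · constructor
    · intro h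
      exact (hfwd h).1
    · intro h
      exact hrev h
  · intro h
    exact (hfwd h).2

lemma pvGo_eq (ls : List (List String)) :
    ∀ embs cursors (q : Nat) acc, q ≤ ls.length → pvInv ls cursors q →
      pvGoB ls (pvBuckets ls) embs cursors (q : Int) acc = pvGoA ls embs q acc := by
  intro embs
  induction embs with
  | nil => intro cursors q acc _ _; rfl
  | cons e rest ih =>
    intro cursors q acc hq hinv
    obtain ⟨hiff, hval⟩ := pvBridge ls cursors q e hq hinv
    rw [pvGoB, pvGoA]
    by_cases hk : pvSkipB ((pvBuckets ls).getD e []) (cursors.getD e 0) (q : Int) <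
        ((pvBuckets ls).getD e []).length
    · have hf : pvFindIdxA ls q e < ls.length := hiff.mp hk
      have hvk := hval hk
      simp only [hk, dif_pos, hvk]
      rw [if_neg (by omega)]
      rw [PySem.List.pyGetD_natCast]
      have hcast : (pvFindIdxA ls q e : Int) + 1 = ((pvFindIdxA ls q e + 1 : Nat) : Int) := by
        push_cast; ring
      rw [hcast]
      apply ih _ _ _ (by omega)
      intro e'
      by_cases he : e' = e
      · rw [he]
        obtain ⟨hc1, hc2⟩ := hinv e
        obtain ⟨hk1, hk2, hk3, hk4⟩ := pvSkipB_char ((pvBuckets ls).getD e []) (q : Int)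
          (cursors.getD e 0) hc1
        have hqf : q ≤ pvFindIdxA ls q e := (pvFindIdxA_char ls e q hq).1
        constructor
        · rw [PySem.Dict.getD_insert_self]
          omega
        · intro j hj hjc
          rw [PySem.Dict.getD_insert_self] at hjc
          by_cases hjk : j < pvSkipB ((pvBuckets ls).getD e []) (cursors.getD e 0) (q : Int)
          · have hlt : ((pvBuckets ls).getD e [])[j] < (q : Int) := by
              by_cases hjc' : j < cursors.getD e 0
              · exact hc2 j hj hjc'
              · exact hk3 j hj (by omega) hjk
            push_cast
            omega
          · have hje2 : j = pvSkipB ((pvBuckets ls).getD e []) (cursors.getD e 0) (q : Int) := by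
              omega
            subst hje2
            rw [hvk]
            push_cast
            omega
      · obtain ⟨hc1, hc2⟩ := hinv e'
        have hqf : q ≤ pvFindIdxA ls q e := (pvFindIdxA_char ls e q hq).1
        constructor
        · rw [PySem.Dict.getD_insert, if_neg he]
          exact hc1
        · intro j hj hjc
          rw [PySem.Dict.getD_insert, if_neg he] at hjc
          have := hc2 j hj hjc
          push_cast
          omega
    · have hf : ¬ pvFindIdxA ls q e < ls.length := fun h => hk (hiff.mpr h)
      have hfle : pvFindIdxA ls q e ≤ ls.length := (pvFindIdxA_char ls e q hq).2.1
      simp only [hk, dif_neg, not_false_iff]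
      rw [if_pos (by omega)]

-- ===== VERDICT (by name: the statement is the Claim_ definition above) =====
theorem align_labels_to_embeddings_spec : Claim_equal_align_labels_to_embeddings := by
  intro ls es _
  show align_labels_to_embeddings ls es = align_labels_to_embeddings_alt ls es
  unfold align_labels_to_embeddings align_labels_to_embeddings_alt
  have h0 : ((0 : Nat) : Int) = (0 : Int) := rfl
  rw [← h0, pvGo_eq ls es PySem.Dict.empty 0 [] (Nat.zero_le _)]
  intro e
  constructor
  · simp [PySem.Dict.getD_empty]
  · intro j hj hlt
    simp [PySem.Dict.getD_empty] at hlt
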